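-- pv_equiv track=rewrite | github.com/jerko12/IndoorTrackingCasus | app.py | GetTimeAfterIndex
-- ===== SOURCE A (Python) =====
-- def GetTimeAfterIndex(hour,minute,index):
--     for i in range(0,index):
--         if(minute <= 0):
--             minute = 59
--             if(hour > 0):
--                 hour -= 1
--             else:
--                 hour = 23
--         else:
--             minute -=1
--     return hour,minute
-- ===== SOURCE B (Python) =====
-- def GetTimeAfterIndex(hour, minute, index):
--     # walk backwards in chunks: spend the whole current minute-run at once,
--     # then borrow one hour per iteration (one iteration per ~60 minutes)
--     while index > 0:
--         if minute >= index:
--             return hour, minute - index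
--         if minute > 0:
--             index -= minute
--             minute = 0
--         else:
--             hour = hour - 1 if hour > 0 else 23
--             minute = 59
--             index -= 1
--     return hour, minute
-- ===== Notes on version B (the rewrite author's own statement) =====
-- stated objective: faster
-- what changed: Replaces the per-minute countdown loop (one iteration per minute of index) with a chunked loop that spends the whole current minute-run in a single subtraction and performs one hour-borrow per iteration, doing about index/60 iterations instead of index.
import Mathlib
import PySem

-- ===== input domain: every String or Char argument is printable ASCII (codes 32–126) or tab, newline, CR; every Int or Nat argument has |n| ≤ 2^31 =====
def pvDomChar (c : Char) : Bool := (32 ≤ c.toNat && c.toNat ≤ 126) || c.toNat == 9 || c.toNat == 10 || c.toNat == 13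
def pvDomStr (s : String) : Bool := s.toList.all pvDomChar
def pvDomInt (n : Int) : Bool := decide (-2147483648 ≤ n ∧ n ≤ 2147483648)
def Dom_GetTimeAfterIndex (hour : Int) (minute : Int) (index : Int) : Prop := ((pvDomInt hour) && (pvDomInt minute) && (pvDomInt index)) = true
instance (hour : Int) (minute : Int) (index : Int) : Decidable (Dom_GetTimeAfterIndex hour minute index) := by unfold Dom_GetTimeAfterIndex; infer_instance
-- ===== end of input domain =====

-- B replaces A's per-minute countdown loop with a chunked loop (one subtraction per minute-run, one hour-borrow per iteration): ~index/60 iterations instead of index.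

-- ===== PORT A =====
-- one iteration of A's for-loop body (state = (hour, minute))
def GetTimeAfterIndexStep (st : Int × Int) : Int × Int :=
  if st.2 ≤ 0 then
    (if st.1 > 0 then st.1 - 1 else 23, 59)
  else
    (st.1, st.2 - 1)

def GetTimeAfterIndex (hour : Int) (minute : Int) (index : Int) : List Int :=
  let s := (PySem.List.pyRange 0 index 1).foldl (fun st _ => GetTimeAfterIndexStep st) (hour, minute)
  [s.1, s.2]

-- ===== PORT B =====
-- B's while loop, as structural recursion on the remaining index
def GetTimeAfterIndexAltLoop (hour : Int) (minute : Int) (index : Int) : Int × Int :=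
  if 0 < index then
    if minute ≥ index then (hour, minute - index)
    else if minute > 0 then GetTimeAfterIndexAltLoop hour 0 (index - minute)
    else GetTimeAfterIndexAltLoop (if hour > 0 then hour - 1 else 23) 59 (index - 1)
  else (hour, minute)
termination_by index.toNat
decreasing_by all_goals omega

def GetTimeAfterIndex_alt (hour : Int) (minute : Int) (index : Int) : List Int :=
  let s := GetTimeAfterIndexAltLoop hour minute index
  [s.1, s.2]

-- ===== PRECONDITION & SPEC =====
def Spec_GetTimeAfterIndex (hour : Int) (minute : Int) (index : Int) (out : List Int) : Prop := out = GetTimeAfterIndex_alt hour minute index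
instance (hour : Int) (minute : Int) (index : Int) (out : List Int) : Decidable (Spec_GetTimeAfterIndex hour minute index out) := by unfold Spec_GetTimeAfterIndex; infer_instance

-- ===== CLAIM (what is proved, stated in full; the proofs are below) =====
def Claim_equal_GetTimeAfterIndex : Prop := ∀ (hour : Int) (minute : Int) (index : Int), Dom_GetTimeAfterIndex hour minute index → Spec_GetTimeAfterIndex hour minute index (GetTimeAfterIndex hour minute index)

-- ===== LEMMAS AND PROOFS =====

lemma foldl_step (l : List Int) (s : Int × Int) :
    l.foldl (fun st _ => GetTimeAfterIndexStep st) s = GetTimeAfterIndexStep^[l.length] s := by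
  induction l generalizing s with
  | nil => rfl
  | cons a t ih => simp [List.foldl_cons, ih, Function.iterate_succ_apply]

-- while the minute stays positive, each step just decrements it
lemma iterate_step_sub (n : Nat) (h m : Int) (hn : (n : Int) ≤ m) :
    GetTimeAfterIndexStep^[n] (h, m) = (h, m - n) := by
  induction n generalizing m with
  | zero => simp
  | succ k ih =>
      rw [Function.iterate_succ_apply]
      have hm : ¬ m ≤ 0 := by push_cast at hn ⊢; omega
      simp only [GetTimeAfterIndexStep, hm, if_false]
      rw [ih (m - 1) (by push_cast at hn ⊢; omega)]
      exact Prod.ext rfl (by push_cast; ring)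

lemma iterate_eq_altLoop (hour minute index : Int) :
    GetTimeAfterIndexStep^[index.toNat] (hour, minute) = GetTimeAfterIndexAltLoop hour minute index := by
  induction hour, minute, index using GetTimeAfterIndexAltLoop.induct with
  | case1 h m i hi hge =>
      rw [GetTimeAfterIndexAltLoop, if_pos hi, if_pos hge]
      exact iterate_step_sub i.toNat h m (by omega) |>.trans (by rw [Int.toNat_of_nonneg (by omega)])
  | case2 h m i hi hge hm ih =>
      rw [GetTimeAfterIndexAltLoop, if_pos hi, if_neg hge, if_pos hm, ← ih]
      have : i.toNat = (i - m).toNat + m.toNat := by omega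
      rw [this, Function.iterate_add_apply]
      congr 1
      have := iterate_step_sub m.toNat h m (by omega)
      rw [this, Int.toNat_of_nonneg (by omega)]
      simp
  | case3 h m i hi hge hm ih =>
      simp only [dite_eq_ite] at ih
      rw [GetTimeAfterIndexAltLoop, if_pos hi, if_neg hge, if_neg hm, ← ih]
      have : i.toNat = (i - 1).toNat + 1 := by omega
      rw [this, Function.iterate_succ_apply]
      have hm0 : m ≤ 0 := by omega
      simp only [GetTimeAfterIndexStep, hm0, if_pos]
  | case4 h m i hi =>
      rw [GetTimeAfterIndexAltLoop, if_neg hi]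
      have : i.toNat = 0 := by omega
      rw [this]; rfl

-- ===== VERDICT (by name: the statement is the Claim_ definition above) =====
theorem GetTimeAfterIndex_spec : Claim_equal_GetTimeAfterIndex := by
  intro hour minute index _
  unfold Spec_GetTimeAfterIndex GetTimeAfterIndex GetTimeAfterIndex_alt
  rw [foldl_step, PySem.List.length_pyRange_one, ← iterate_eq_altLoop]
  norm_num
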